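-- pv_equiv track=rewrite | github.com/AskNowQA/LC-QuAD | utils/subgraph.py | permute_dicts
-- ===== SOURCE A (Python) =====
-- def permute_dicts(_d1, _d2, _optional=True):
--     """
--         Given two list of dicts, it creates a list of dicts having a combination of both values.
--
--         Assumption:
--             - a list's dicts will have same keys
--             - if two dict have common keys, only permute elements whose values for common keys are same.
--
--     :param _d1: list of dicts
--     :param _d2: list of dicts
--     :param _optional: bool: flag which if False, will return nothing if one of _d* is empty.
--     :return: list of dicts
--     """
--     if not _optional and (len(_d1) == 0 or len(_d2) == 0):
--         return []
--     if len(_d1) == 0: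
--         return _d2
--     elif len(_d2) == 0:
--         return _d1
--
--     # ALSO PUT MAP HERE
--     keys1 = set(_d1[-1].keys())
--     keys2 = set(_d2[-1].keys())
--     common_keys = keys1 & keys2
--
--     data = []
--
--     for dict1 in _d1:
--         for dict2 in _d2:
--             if common_keys:  # If there are common keys, accept elements only if their values are same.
--                 disjoint = False
--                 for key in common_keys:
--                     if dict1[key] != dict2[key]:
--                         disjoint = True
--                 if disjoint:
--                     continue
--
--             new_dict = dict1.copy()
--             new_dict.update(dict2)
--             data.append(new_dict)
--
--     return data
-- ===== SOURCE B (Python) =====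
-- def permute_dicts(_d1, _d2, _optional=True):
--     if not _d1 or not _d2:
--         if not _optional:
--             return []
--         return _d2 if not _d1 else _d1
--     common = [k for k in _d1[-1] if k in _d2[-1]]
--     buckets = {}
--     for dict2 in _d2:
--         buckets.setdefault(tuple(dict2[k] for k in common), []).append(dict2)
--     out = []
--     for dict1 in _d1:
--         for dict2 in buckets.get(tuple(dict1[k] for k in common), ()):
--             merged = dict1.copy()
--             merged.update(dict2)
--             out.append(merged)
--     return out
-- ===== Notes on version B (the rewrite author's own statement) =====
-- stated objective: alternative
-- what changed: Replaces A's nested scan over every pair of _d1 x _d2 (re-testing each common key per pair) by a hash join: _d2 is bucketed once by its tuple of common-key values and each dict of _d1 probes its bucket directly.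
import Mathlib
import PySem

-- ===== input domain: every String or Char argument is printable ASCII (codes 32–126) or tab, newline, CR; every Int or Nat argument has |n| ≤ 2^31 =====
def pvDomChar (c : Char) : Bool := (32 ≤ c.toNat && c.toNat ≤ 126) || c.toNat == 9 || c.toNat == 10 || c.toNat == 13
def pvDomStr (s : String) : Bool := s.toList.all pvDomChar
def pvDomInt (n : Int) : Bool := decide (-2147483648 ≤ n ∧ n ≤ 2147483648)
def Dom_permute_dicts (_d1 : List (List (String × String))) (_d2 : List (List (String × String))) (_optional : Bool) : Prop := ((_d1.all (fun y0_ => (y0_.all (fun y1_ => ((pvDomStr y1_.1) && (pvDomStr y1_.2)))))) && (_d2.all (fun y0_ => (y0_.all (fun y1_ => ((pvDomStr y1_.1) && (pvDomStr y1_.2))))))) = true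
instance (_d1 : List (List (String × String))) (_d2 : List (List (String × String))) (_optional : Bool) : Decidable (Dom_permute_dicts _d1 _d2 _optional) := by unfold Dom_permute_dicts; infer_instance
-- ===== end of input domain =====

-- B replaces A's nested scan over _d1 × _d2 by a hash join (bucket _d2 by its common-key
-- value tuple, probe once per dict of _d1); equivalence of the RETURN value is proved on Pre_.
-- Dicts cross the List↔dict boundary via PySem.Dict.ofList (Python collapses duplicate keys)
-- and are returned as .items.

-- ===== PORT A =====
-- new_dict = dict1.copy(); new_dict.update(dict2)
def pvMerge (dict1 dict2 : PySem.Dict String String) : PySem.Dict String String :=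
  dict1.update dict2.items

def permute_dicts (_d1 : List (List (String × String))) (_d2 : List (List (String × String))) (_optional : Bool) : List (List (String × String)) :=
  if !_optional && (_d1.length == 0 || _d2.length == 0) then []
  else if _d1.length == 0 then _d2.map (fun d => (PySem.Dict.ofList d).items)
  else if _d2.length == 0 then _d1.map (fun d => (PySem.Dict.ofList d).items)
  else
    let ds1 := _d1.map PySem.Dict.ofList
    let ds2 := _d2.map PySem.Dict.ofList
    let keys1 : PySem.Set String := PySem.Set.ofList (ds1.getLastD .empty).keys
    let keys2 : PySem.Set String := PySem.Set.ofList (ds2.getLastD .empty).keys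
    let common_keys : PySem.Set String := PySem.Set.inter keys1 keys2
    ds1.foldl (fun data dict1 =>
      ds2.foldl (fun data dict2 =>
        if !common_keys.isEmpty then
          -- dict1[key] / dict2[key]: Python raises KeyError when absent; Pre_ excludes
          -- those inputs, so the "" defaults are never compared on admitted inputs
          let disjoint := common_keys.foldl
            (fun dj key => if dict1.getD key "" != dict2.getD key "" then true else dj) false
          if disjoint then data else data ++ [(pvMerge dict1 dict2).items]
        else data ++ [(pvMerge dict1 dict2).items]) data) []

-- ===== PORT B =====
-- tuple(d[k] for k in common) (KeyError when absent — excluded by Pre_, as in A)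
def pvSig (common : List String) (d : PySem.Dict String String) : List String :=
  common.map (fun k => d.getD k "")

def permute_dicts_alt (_d1 : List (List (String × String))) (_d2 : List (List (String × String))) (_optional : Bool) : List (List (String × String)) :=
  if _d1.isEmpty || _d2.isEmpty then
    if !_optional then []
    else if _d1.isEmpty then _d2.map (fun d => (PySem.Dict.ofList d).items)
    else _d1.map (fun d => (PySem.Dict.ofList d).items)
  else
    let ds1 := _d1.map PySem.Dict.ofList
    let ds2 := _d2.map PySem.Dict.ofList
    let common := (ds1.getLastD .empty).keys.filter (fun k => (ds2.getLastD .empty).contains k)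
    -- buckets.setdefault(sig(dict2), []).append(dict2)
    let buckets : PySem.Dict (List String) (List (PySem.Dict String String)) :=
      ds2.foldl (fun b d => b.modify (pvSig common d) [] (· ++ [d])) PySem.Dict.empty
    ds1.foldl (fun out d1 =>
      out ++ (buckets.getD (pvSig common d1) []).map (fun d2 => (pvMerge d1 d2).items)) []

-- ===== PRECONDITION & SPEC =====
-- Pre_ excludes exactly the inputs where the Python raises KeyError: both lists nonempty
-- and some dict of either list lacks a key common to the two last dicts (the docstring's
-- "a list's dicts will have same keys" assumption); both A and B raise there.
def Pre_permute_dicts (_d1 : List (List (String × String))) (_d2 : List (List (String × String))) (_optional : Bool) : Prop :=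
  _d1 ≠ [] → _d2 ≠ [] →
    ∀ k ∈ (PySem.Dict.ofList (_d1.getLastD [])).keys,
      k ∈ (PySem.Dict.ofList (_d2.getLastD [])).keys →
        ∀ d ∈ _d1 ++ _d2, (PySem.Dict.ofList d).contains k = true
instance (_d1 : List (List (String × String))) (_d2 : List (List (String × String))) (_optional : Bool) : Decidable (Pre_permute_dicts _d1 _d2 _optional) := by unfold Pre_permute_dicts; infer_instance

def pvWitness_permute_dicts : (List (List (String × String))) × (List (List (String × String))) × Bool :=
  ([[("a", "x")], [("a", "x"), ("c", "u")]], [[("a", "x"), ("b", "y")], [("a", "z"), ("b", "w")]], true)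

def Spec_permute_dicts (_d1 : List (List (String × String))) (_d2 : List (List (String × String))) (_optional : Bool) (out : List (List (String × String))) : Prop := out = permute_dicts_alt _d1 _d2 _optional
instance (_d1 : List (List (String × String))) (_d2 : List (List (String × String))) (_optional : Bool) (out : List (List (String × String))) : Decidable (Spec_permute_dicts _d1 _d2 _optional out) := by unfold Spec_permute_dicts; infer_instance

-- ===== CLAIM (what is proved, stated in full; the proofs are below) =====
def Claim_equal_permute_dicts : Prop := ∀ (_d1 : List (List (String × String))) (_d2 : List (List (String × String))) (_optional : Bool), Dom_permute_dicts _d1 _d2 _optional → Pre_permute_dicts _d1 _d2 _optional → Spec_permute_dicts _d1 _d2 _optional (permute_dicts _d1 _d2 _optional)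

-- ===== LEMMAS AND PROOFS =====

-- A's membership test over the common-key SET equals B's signature-tuple comparison,
-- for any two lists with the same members.
theorem pv_any_eq_sig_beq (cA cB : List String) (h : ∀ x, x ∈ cA ↔ x ∈ cB)
    (d1 d2 : PySem.Dict String String) :
    (!(cA.any fun k => d1.getD k "" != d2.getD k ""))
      = (pvSig cB d2 == pvSig cB d1) := by
  rw [Bool.eq_iff_iff]
  simp only [pvSig, Bool.not_eq_eq_eq_not, Bool.not_true, List.any_eq_false, bne_iff_ne,
    ne_eq, not_not, beq_iff_eq, List.map_inj_left]
  constructor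
  · intro hall k hk; exact ((hall k ((h k).mpr hk))).symm
  · intro hall k hk; exact ((hall k ((h k).mp hk))).symm

-- A's inner loop over ds2 appends exactly the matching merges.
theorem pv_inner_eq (common : PySem.Set String) (dict1 : PySem.Dict String String)
    (ds2 : List (PySem.Dict String String)) (data : List (List (String × String))) :
    ds2.foldl (fun data dict2 =>
        if !common.isEmpty then
          if common.foldl
            (fun dj key => if dict1.getD key "" != dict2.getD key "" then true else dj) false
          then data else data ++ [(pvMerge dict1 dict2).items]
        else data ++ [(pvMerge dict1 dict2).items]) data
      = data ++ (ds2.filter (fun d2 => !(common.any fun k => dict1.getD k "" != d2.getD k ""))).map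
          (fun d2 => (pvMerge dict1 d2).items) := by
  have hstep : (fun (data : List (List (String × String))) dict2 =>
        if !common.isEmpty then
          if common.foldl
            (fun dj key => if dict1.getD key "" != dict2.getD key "" then true else dj) false
          then data else data ++ [(pvMerge dict1 dict2).items]
        else data ++ [(pvMerge dict1 dict2).items])
      = (fun data d2 =>
          if (!(common.any fun k => dict1.getD k "" != d2.getD k "")) then
            data ++ [(pvMerge dict1 d2).items] else data) := by
    funext data d2
    by_cases hc : common.isEmpty
    · have : common = [] := List.isEmpty_iff.mp hc
      simp [this]
    · simp only [hc, Bool.not_false, if_pos]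
      rw [PySem.List.foldl_if_true_eq (fun key => dict1.getD key "" != d2.getD key "")]
      cases hany : common.any fun k => dict1.getD k "" != d2.getD k "" <;> simp
  rw [hstep, PySem.List.foldl_append_if]

-- B's bucket lookup returns exactly the dicts of ds2 whose signature matches.
theorem pv_bucket_eq (common : List String) (ds2 : List (PySem.Dict String String))
    (k : List String) :
    (ds2.foldl (fun b d => b.modify (pvSig common d) [] (· ++ [d])) PySem.Dict.empty).getD k []
      = ds2.filter (fun d2 => pvSig common d2 == k) := by
  have h1 : ds2.foldl (fun b d => b.modify (pvSig common d) [] (· ++ [d])) PySem.Dict.empty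
      = (ds2.map (fun d => (pvSig common d, d))).foldl
          (fun b p => b.modify p.1 [] (· ++ [p.2])) PySem.Dict.empty := by
    rw [List.foldl_map]
  rw [h1, PySem.Dict.getD_foldl_modify_append]
  simp [List.filter_map, Function.comp_def]

theorem permute_dicts_eq_alt (_d1 _d2 : List (List (String × String))) (_optional : Bool) :
    permute_dicts _d1 _d2 _optional = permute_dicts_alt _d1 _d2 _optional := by
  rcases _d1 with _ | ⟨a1, t1⟩
  · cases _optional <;> simp [permute_dicts, permute_dicts_alt]
  rcases _d2 with _ | ⟨a2, t2⟩
  · cases _optional <;> simp [permute_dicts, permute_dicts_alt]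
  -- both lists nonempty: the real join
  have e1 : (t1.length + 1 == 0) = false := by simp
  have e2 : (t2.length + 1 == 0) = false := by simp
  simp only [permute_dicts, permute_dicts_alt, List.length_cons, e1, e2, List.isEmpty_cons,
    Bool.or_self, Bool.and_false, Bool.false_eq_true, if_false]
  set ds1 := (a1 :: t1).map PySem.Dict.ofList with hds1
  set ds2 := (a2 :: t2).map PySem.Dict.ofList with hds2
  set cA : PySem.Set String :=
    PySem.Set.inter (PySem.Set.ofList (ds1.getLastD .empty).keys)
      (PySem.Set.ofList (ds2.getLastD .empty).keys) with hcA
  set cB : List String :=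
    (ds1.getLastD .empty).keys.filter (fun k => (ds2.getLastD .empty).contains k) with hcB
  have hmem : ∀ x, x ∈ cA ↔ x ∈ cB := by
    intro x
    rw [hcA, hcB, PySem.Set.mem_inter, PySem.Set.mem_ofList, PySem.Set.mem_ofList,
      List.mem_filter]
    constructor
    · rintro ⟨h1, h2⟩; exact ⟨h1, (PySem.Dict.contains_iff_mem_keys _ _).mpr h2⟩
    · rintro ⟨h1, h2⟩; exact ⟨h1, (PySem.Dict.contains_iff_mem_keys _ _).mp h2⟩
  have hA : ∀ (init : List (List (String × String))),
      ds1.foldl (fun data dict1 =>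
        ds2.foldl (fun data dict2 =>
          if !cA.isEmpty then
            if cA.foldl
              (fun dj key => if dict1.getD key "" != dict2.getD key "" then true else dj) false
            then data else data ++ [(pvMerge dict1 dict2).items]
          else data ++ [(pvMerge dict1 dict2).items]) data) init
      = init ++ ds1.flatMap (fun d1 =>
          (ds2.filter (fun d2 => pvSig cB d2 == pvSig cB d1)).map
            (fun d2 => (pvMerge d1 d2).items)) := by
    intro init
    have : (fun (data : List (List (String × String))) dict1 =>
        ds2.foldl (fun data dict2 =>
          if !cA.isEmpty then
            if cA.foldl
              (fun dj key => if dict1.getD key "" != dict2.getD key "" then true else dj) false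
            then data else data ++ [(pvMerge dict1 dict2).items]
          else data ++ [(pvMerge dict1 dict2).items]) data)
        = (fun data d1 => data ++
            (ds2.filter (fun d2 => pvSig cB d2 == pvSig cB d1)).map
              (fun d2 => (pvMerge d1 d2).items)) := by
      funext data d1
      rw [pv_inner_eq]
      congr 1
      apply congrArg
      apply List.filter_congr
      intro d2 _
      exact pv_any_eq_sig_beq cA cB hmem d1 d2
    rw [this, PySem.List.foldl_append_eq_flatMap]
  have hB : ∀ (init : List (List (String × String))),
      ds1.foldl (fun out d1 =>
        out ++ ((ds2.foldl (fun b d => b.modify (pvSig cB d) [] (· ++ [d]))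
            PySem.Dict.empty).getD (pvSig cB d1) []).map
          (fun d2 => (pvMerge d1 d2).items)) init
      = init ++ ds1.flatMap (fun d1 =>
          (ds2.filter (fun d2 => pvSig cB d2 == pvSig cB d1)).map
            (fun d2 => (pvMerge d1 d2).items)) := by
    intro init
    have : (fun (out : List (List (String × String))) d1 =>
        out ++ ((ds2.foldl (fun b d => b.modify (pvSig cB d) [] (· ++ [d]))
            PySem.Dict.empty).getD (pvSig cB d1) []).map
          (fun d2 => (pvMerge d1 d2).items))
        = (fun out d1 => out ++
            (ds2.filter (fun d2 => pvSig cB d2 == pvSig cB d1)).map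
              (fun d2 => (pvMerge d1 d2).items)) := by
      funext out d1
      rw [pv_bucket_eq]
    rw [this, PySem.List.foldl_append_eq_flatMap]
  rw [hA, hB]

-- ===== VERDICT (by name: the statement is the Claim_ definition above) =====
theorem permute_dicts_spec : Claim_equal_permute_dicts := by
  intro _d1 _d2 _optional _ _
  unfold Spec_permute_dicts
  exact permute_dicts_eq_alt _d1 _d2 _optional
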